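-- pv_equiv track=rewrite | github.com/whu-lyh/SCSegamba | mmcls/SAVSS_dev/models/SAVSS/HSMM_layer.py | Parallel_snake_horizontal2
-- ===== SOURCE A (Python) =====
-- def Parallel_snake_horizontal2(hw_shape):
--     """
--     Generate a horizontal serpentine (snake-like) scan order starting from
--     the top-left corner of the grid.
--
--     This method performs a row-wise traversal beginning at (0, 0). For each row,
--     the scanning direction alternates: even-indexed rows move left-to-right,
--     while odd-indexed rows move right-to-left. The traversal continues until all
--     H × W grid elements are visited. Direction codes are internally recorded
--     but not returned, except for the forward scan order.
--
--     Args: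
--         hw_shape (tuple[int, int]):
--             A tuple (H, W) specifying the grid height and width.
--
--     Returns:
--         tuple[list[int], list[int]]:
--             - o1: Forward scan order following the horizontal serpentine traversal.
--                 Each element corresponds to a flattened grid index i * W + j.
--             - o1_inverse: Inverse mapping array where o1_inverse[idx] gives the
--                         position of index `idx` in the serialized forward path.
--                         This enables O(1) lookup from grid index to traversal order.
--     """
--     H, W = hw_shape
--     L = H * W
--
--     o1 = []
--     d1 = []
--     o1_inverse = [-1 for _ in range(L)]
--     i, j = 0, 0
--     j_d = "right"
--     while i < H:
--         assert j_d in ["right", "left"]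
--         idx = i * W + j
--         o1_inverse[idx] = len(o1)
--         o1.append(idx)
--         if j_d == "right":
--             if j < W-1:
--                 j = j + 1
--                 d1.append(1)
--             else:
--                 i = i + 1
--                 d1.append(4)
--                 j_d = "left"
--         else:
--             if j > 0:
--                 j = j - 1
--                 d1.append(2)
--             else:
--                 i = i + 1
--                 d1.append(4)
--                 j_d = "right"
--     d1 = [0] + d1[:-1]
--
--     return o1, o1_inverse
-- ===== SOURCE B (Python) =====
-- def Parallel_snake_horizontal2(hw_shape):
--     H, W = hw_shape
--     o1 = []
--     o1_inverse = [-1] * (H * W)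
--     for i in range(H):
--         cols = range(W) if i % 2 == 0 else range(W - 1, -1, -1)
--         for j in cols:
--             idx = i * W + j
--             o1_inverse[idx] = len(o1)
--             o1.append(idx)
--     return o1, o1_inverse
-- ===== Notes on version B (the rewrite author's own statement) =====
-- stated objective: simpler
-- what changed: Replaces A's single while-loop state machine (cursor i,j plus a direction string flag and an unused direction list d1) by a direct nested row/column traversal: row i iterates columns left-to-right when i is even and right-to-left when i is odd; the per-step direction-string comparisons and the dead d1 bookkeeping disappear.
import Mathlib
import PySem

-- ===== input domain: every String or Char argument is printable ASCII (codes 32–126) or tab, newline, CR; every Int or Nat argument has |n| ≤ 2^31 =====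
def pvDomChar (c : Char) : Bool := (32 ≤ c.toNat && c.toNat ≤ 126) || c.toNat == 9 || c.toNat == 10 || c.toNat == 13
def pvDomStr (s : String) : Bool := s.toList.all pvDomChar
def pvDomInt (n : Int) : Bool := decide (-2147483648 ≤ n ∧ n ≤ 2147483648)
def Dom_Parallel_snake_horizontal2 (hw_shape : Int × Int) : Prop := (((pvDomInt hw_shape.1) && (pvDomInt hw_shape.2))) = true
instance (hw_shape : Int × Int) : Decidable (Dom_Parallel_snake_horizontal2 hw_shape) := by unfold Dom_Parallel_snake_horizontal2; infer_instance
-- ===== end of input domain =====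

-- B replaces A's while-loop cursor/direction state machine by a direct nested row/column
-- traversal (objective: simpler); A's dead direction list d1 is kept in A's port but dropped in B.

-- ===== PORT A =====
-- A's while loop, state (i, j, j_d as Bool 'right', o1, d1, o1_inverse).
-- 'o1_inverse[idx] = len(o1)' is ported as List.set idx.toNat; exact when 0 ≤ idx < length,
-- which holds on every executed assignment under Pre_ (outside Pre_ Python raises IndexError).
def pvLoopA (H W i j : Int) (right : Bool) (o1 d1 inv : List Int) :
    List Int × List Int × List Int :=
  if h : i < H then
    let idx := i * W + j
    let inv' := inv.set idx.toNat (o1.length : Int)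
    let o1' := o1 ++ [idx]
    if hr : right then
      if hj : j < W - 1 then pvLoopA H W i (j + 1) true o1' (d1 ++ [1]) inv'
      else pvLoopA H W (i + 1) j false o1' (d1 ++ [4]) inv'
    else
      if hj : j > 0 then pvLoopA H W i (j - 1) false o1' (d1 ++ [2]) inv'
      else pvLoopA H W (i + 1) j true o1' (d1 ++ [4]) inv'
  else (o1, d1, inv)
termination_by ((H - i).toNat, if right then (W - 1 - j).toNat else j.toNat)
decreasing_by
  · apply Prod.Lex.right
    show (if True then (W - 1 - (j + 1)).toNat else (j + 1).toNat) <
      if right = true then (W - 1 - j).toNat else j.toNat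
    rw [hr]; simp only [reduceIte]; omega
  · apply Prod.Lex.left
    show (H - (i + 1)).toNat < (H - i).toNat
    omega
  · apply Prod.Lex.right
    show (if False then (W - 1 - (j - 1)).toNat else (j - 1).toNat) <
      if right = true then (W - 1 - j).toNat else j.toNat
    rw [Bool.not_eq_true] at hr; rw [hr, if_neg Bool.false_ne_true, if_neg not_false]; omega
  · apply Prod.Lex.left
    show (H - (i + 1)).toNat < (H - i).toNat
    omega

def Parallel_snake_horizontal2 (hw_shape : Int × Int) : List Int × List Int :=
  let H := hw_shape.1
  let W := hw_shape.2
  let L := H * W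
  let st := pvLoopA H W 0 0 true [] [] (List.replicate L.toNat (-1))
  let _d1 := (0 : Int) :: st.2.1.dropLast   -- d1 = [0] + d1[:-1]; dead in A (never returned)
  (st.1, st.2.2)

-- ===== PORT B =====
-- one grid cell: append idx to o1, record its position in o1_inverse
def pvCell (i W : Int) (st : List Int × List Int) (j : Int) : List Int × List Int :=
  let idx := i * W + j
  (st.1 ++ [idx], st.2.set idx.toNat (st.1.length : Int))

-- cols = range(W) if i % 2 == 0 else range(W-1, -1, -1)
def pvRowCols (W i : Int) : List Int :=
  if PySem.Int.mod i 2 = 0 then PySem.List.pyRange 0 W 1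
  else PySem.List.pyRange (W - 1) (-1) (-1)

def Parallel_snake_horizontal2_alt (hw_shape : Int × Int) : List Int × List Int :=
  let H := hw_shape.1
  let W := hw_shape.2
  (PySem.List.pyRange 0 H 1).foldl
    (fun st i => (pvRowCols W i).foldl (pvCell i W) st)
    ([], List.replicate (H * W).toNat (-1))

-- ===== PRECONDITION & SPEC =====
-- Pre_ excludes exactly H > 0 ∧ W ≤ 0, where A raises IndexError (assignment into an empty o1_inverse).
def Pre_Parallel_snake_horizontal2 (hw_shape : Int × Int) : Prop :=
  hw_shape.1 ≤ 0 ∨ 0 < hw_shape.2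
instance (hw_shape : Int × Int) : Decidable (Pre_Parallel_snake_horizontal2 hw_shape) := by
  unfold Pre_Parallel_snake_horizontal2; infer_instance

def pvWitness_Parallel_snake_horizontal2 : (Int × Int) := (2, 3)


def Spec_Parallel_snake_horizontal2 (hw_shape : Int × Int) (out : List Int × List Int) : Prop := out = Parallel_snake_horizontal2_alt hw_shape
instance (hw_shape : Int × Int) (out : List Int × List Int) : Decidable (Spec_Parallel_snake_horizontal2 hw_shape out) := by unfold Spec_Parallel_snake_horizontal2; infer_instance

-- ===== CLAIM (what is proved, stated in full; the proofs are below) =====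
def Claim_equal_Parallel_snake_horizontal2 : Prop := ∀ (hw_shape : Int × Int), Dom_Parallel_snake_horizontal2 hw_shape → Pre_Parallel_snake_horizontal2 hw_shape → Spec_Parallel_snake_horizontal2 hw_shape (Parallel_snake_horizontal2 hw_shape)

-- ===== LEMMAS AND PROOFS =====

-- scanning one row left-to-right: A's loop from column c to W-1 equals B's fold over range(c, W)
lemma pvScanR (H W i : Int) (hi : i < H) :
    ∀ (n : Nat) (c : Int) (o1 d1 inv : List Int), 0 ≤ c → c + (n : Int) = W - 1 →
    ∃ d', pvLoopA H W i c true o1 d1 inv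
      = pvLoopA H W (i + 1) (W - 1) false
          ((PySem.List.pyRange c W 1).foldl (pvCell i W) (o1, inv)).1 d'
          ((PySem.List.pyRange c W 1).foldl (pvCell i W) (o1, inv)).2 := by
  intro n
  induction n with
  | zero =>
    intro c o1 d1 inv _hc hcn
    have hc : c = W - 1 := by omega
    subst hc
    rw [pvLoopA, dif_pos hi, dif_pos rfl]
    rw [dif_neg (by omega : ¬ (W - 1 < W - 1))]
    have hr : PySem.List.pyRange (W - 1) W 1 = [W - 1] := by
      have := PySem.List.pyRange_one_singleton (W - 1)
      simpa using this
    rw [hr]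
    exact ⟨d1 ++ [4], rfl⟩
  | succ n ih =>
    intro c o1 d1 inv hc hcn
    rw [pvLoopA, dif_pos hi, dif_pos rfl]
    rw [dif_pos (by omega : c < W - 1)]
    obtain ⟨d', hd'⟩ := ih (c + 1) (o1 ++ [i * W + c])
      (d1 ++ [1]) (inv.set (i * W + c).toNat (o1.length : Int)) (by omega) (by omega)
    refine ⟨d', ?_⟩
    rw [hd']
    rw [PySem.List.pyRange_one_cons (by omega : c < W)]
    rfl

-- scanning one row right-to-left: A's loop from column c down to 0 equals B's fold over range(c, -1, -1)
lemma pvScanL (H W i : Int) (hi : i < H) :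
    ∀ (n : Nat) (c : Int) (o1 d1 inv : List Int), c = (n : Int) →
    ∃ d', pvLoopA H W i c false o1 d1 inv
      = pvLoopA H W (i + 1) 0 true
          ((PySem.List.pyRange c (-1) (-1)).foldl (pvCell i W) (o1, inv)).1 d'
          ((PySem.List.pyRange c (-1) (-1)).foldl (pvCell i W) (o1, inv)).2 := by
  intro n
  induction n with
  | zero =>
    intro c o1 d1 inv hc
    subst hc
    simp only [Nat.cast_zero]
    rw [pvLoopA, dif_pos hi, dif_neg (by decide : ¬ false = true)]
    rw [dif_neg (by omega : ¬ ((0:Int) > 0))]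
    have hr : PySem.List.pyRange 0 (-1) (-1) = [0] := by
      rw [PySem.List.pyRange_neg_one_cons (by omega : (-1:Int) < 0)]
      rw [show (0:Int) - 1 = -1 by ring, PySem.List.pyRange_neg_one_eq_nil (by omega)]
    rw [hr]
    exact ⟨d1 ++ [4], rfl⟩
  | succ n ih =>
    intro c o1 d1 inv hc
    rw [pvLoopA, dif_pos hi, dif_neg (by decide : ¬ false = true)]
    rw [dif_pos (by omega : c > 0)]
    obtain ⟨d', hd'⟩ := ih (c - 1) (o1 ++ [i * W + c])
      (d1 ++ [2]) (inv.set (i * W + c).toNat (o1.length : Int)) (by omega)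
    refine ⟨d', ?_⟩
    rw [hd']
    rw [PySem.List.pyRange_neg_one_cons (by omega : (-1:Int) < c)]
    rfl

-- parity bookkeeping
lemma pvMod2 (i : Int) : PySem.Int.mod i 2 = i % 2 :=
  PySem.Int.mod_eq_emod_of_pos (by omega)

-- row invariant: entering row i (even rows at column 0 going right, odd rows at column W-1
-- going left), A's loop equals B's fold over the remaining rows
lemma pvRows (H W : Int) (hW : 1 ≤ W) :
    ∀ (m : Nat) (i : Int) (o1 d1 inv : List Int), H - i ≤ (m : Int) → 0 ≤ i →
    ∃ d', pvLoopA H W i (if PySem.Int.mod i 2 = 0 then 0 else W - 1)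
            (decide (PySem.Int.mod i 2 = 0)) o1 d1 inv
      = (((PySem.List.pyRange i H 1).foldl
            (fun st r => (pvRowCols W r).foldl (pvCell r W) st) (o1, inv)).1, d',
         ((PySem.List.pyRange i H 1).foldl
            (fun st r => (pvRowCols W r).foldl (pvCell r W) st) (o1, inv)).2) := by
  intro m
  induction m with
  | zero =>
    intro i o1 d1 inv hm _hi
    rw [pvLoopA]
    rw [dif_neg (by omega : ¬ i < H)]
    rw [PySem.List.pyRange_one_eq_nil (by omega : H ≤ i)]
    exact ⟨d1, rfl⟩
  | succ m ih =>
    intro i o1 d1 inv hm hi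
    by_cases hiH : i < H
    · rw [PySem.List.pyRange_one_cons hiH]
      by_cases hpar : PySem.Int.mod i 2 = 0
      · -- even row: left-to-right
        rw [if_pos hpar, decide_eq_true hpar]
        obtain ⟨d', hd'⟩ := pvScanR H W i hiH (W - 1).toNat 0 o1 d1 inv le_rfl (by omega)
        rw [hd']
        have hpar' : ¬ PySem.Int.mod (i + 1) 2 = 0 := by
          rw [pvMod2] at hpar ⊢; omega
        obtain ⟨d'', hd''⟩ := ih (i + 1)
          ((PySem.List.pyRange 0 W 1).foldl (pvCell i W) (o1, inv)).1 d'
          ((PySem.List.pyRange 0 W 1).foldl (pvCell i W) (o1, inv)).2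
          (by omega) (by omega)
        rw [if_neg hpar', decide_eq_false hpar'] at hd''
        refine ⟨d'', ?_⟩
        rw [hd'']
        have hrc : pvRowCols W i = PySem.List.pyRange 0 W 1 := by
          rw [pvRowCols, if_pos hpar]
        simp only [List.foldl_cons, hrc]
      · -- odd row: right-to-left
        rw [if_neg hpar, decide_eq_false hpar]
        obtain ⟨d', hd'⟩ := pvScanL H W i hiH (W - 1).toNat (W - 1) o1 d1 inv (by omega)
        rw [hd']
        have hpar' : PySem.Int.mod (i + 1) 2 = 0 := by
          rw [pvMod2] at hpar ⊢; omega
        obtain ⟨d'', hd''⟩ := ih (i + 1)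
          ((PySem.List.pyRange (W - 1) (-1) (-1)).foldl (pvCell i W) (o1, inv)).1 d'
          ((PySem.List.pyRange (W - 1) (-1) (-1)).foldl (pvCell i W) (o1, inv)).2
          (by omega) (by omega)
        rw [if_pos hpar', decide_eq_true hpar'] at hd''
        refine ⟨d'', ?_⟩
        rw [hd'']
        have hrc : pvRowCols W i = PySem.List.pyRange (W - 1) (-1) (-1) := by
          rw [pvRowCols, if_neg hpar]
        simp only [List.foldl_cons, hrc]
    · rw [pvLoopA]
      rw [dif_neg hiH]
      rw [PySem.List.pyRange_one_eq_nil (by omega : H ≤ i)]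
      exact ⟨d1, rfl⟩

-- ===== VERDICT (by name: the statement is the Claim_ definition above) =====
theorem Parallel_snake_horizontal2_spec : Claim_equal_Parallel_snake_horizontal2 := by
  intro hw _hdom hpre
  obtain ⟨H, W⟩ := hw
  unfold Spec_Parallel_snake_horizontal2 Parallel_snake_horizontal2 Parallel_snake_horizontal2_alt
  simp only []
  by_cases hH : H ≤ 0
  · rw [pvLoopA, dif_neg (by omega : ¬ (0:Int) < H)]
    rw [PySem.List.pyRange_one_eq_nil (by omega : H ≤ 0)]
    rfl
  · have hW : 0 < W := by
      rcases hpre with h | h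
      · exact absurd h hH
      · exact h
    obtain ⟨d', hd'⟩ := pvRows H W (by omega) H.toNat 0 [] []
      (List.replicate (H * W).toNat (-1)) (by omega) le_rfl
    have h0 : PySem.Int.mod (0:Int) 2 = 0 := by rw [pvMod2]; rfl
    rw [if_pos h0, decide_eq_true h0] at hd'
    rw [hd']
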